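-- pv_equiv track=rewrite | github.com/surimjeon/Algorithm | SWEA/D2/9489. 고대 유적/고대 유적.py | count
-- ===== SOURCE A (Python) =====
-- def count(mapp): #2차원 배열을 한줄씩 읽어서 각 줄에 최대 개수가 몇개인지 확인하는 함수
--     mx=2
--     for lst in mapp:
--         cnt=0
--         for j in lst:
--             if j==1:
--                 cnt+=1
--                 if cnt>mx:
--                     mx=cnt
--             else:
--                 cnt=0
--     return mx
-- ===== SOURCE B (Python) =====
-- def count(mapp):
--     # Derived-representation version: render each row as a '0'/'1' string,
--     # the maximal runs of ones are the pieces of s.split('0'); answer is the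
--     # largest piece length, floored at 2.
--     runs = [len(run)
--             for lst in mapp
--             for run in ''.join('1' if j == 1 else '0' for j in lst).split('0')]
--     return max([2] + runs)
-- ===== Notes on version B (the rewrite author's own statement) =====
-- stated objective: alternative
-- what changed: Replaces the inline incrementing counter with a derived '0'/'1' string per row whose maximal one-runs are extracted by split('0'); the answer is the max piece length over all rows, seeded at 2, taken by a single max() call.
import Mathlib
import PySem

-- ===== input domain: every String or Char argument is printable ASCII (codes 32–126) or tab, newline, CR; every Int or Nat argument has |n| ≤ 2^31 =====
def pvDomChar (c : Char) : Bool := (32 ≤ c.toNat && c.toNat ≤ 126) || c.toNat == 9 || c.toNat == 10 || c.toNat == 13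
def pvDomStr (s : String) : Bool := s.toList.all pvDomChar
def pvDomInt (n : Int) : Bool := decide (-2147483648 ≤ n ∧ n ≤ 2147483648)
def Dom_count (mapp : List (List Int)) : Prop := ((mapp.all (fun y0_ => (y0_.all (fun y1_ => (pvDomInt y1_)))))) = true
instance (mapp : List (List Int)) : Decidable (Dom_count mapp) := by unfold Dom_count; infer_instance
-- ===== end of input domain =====

-- B renders each row as a '0'/'1' string and takes the max length of the pieces of split('0'),
-- seeded at 2, instead of A's running counter; alternative formulation, same cost.

-- ===== PORT A =====
-- the body of A's inner loop: cnt+=1 / mx-update on j==1, cnt=0 otherwise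
def countStep (p : Int × Int) (j : Int) : Int × Int :=
  if j == 1 then (p.1 + 1, if p.1 + 1 > p.2 then p.1 + 1 else p.2) else (0, p.2)

def count (mapp : List (List Int)) : Int :=
  mapp.foldl (fun mx lst => (lst.foldl countStep (0, mx)).2) 2

-- ===== PORT B =====
-- run lengths of the row: lengths of the pieces of ('0'/'1' rendering).split('0')
-- (str.split with a one-char separator is exactly List.splitOn on the char list)
def rowRuns (lst : List Int) : List Int :=
  ((lst.map (fun j => if j == 1 then '1' else '0')).splitOn '0').map
    (fun run => (run.length : Int))

def count_alt (mapp : List (List Int)) : Int :=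
  (PySem.List.max? ((2 : Int) :: mapp.flatMap rowRuns) (fun y => y)).getD 2

-- ===== PRECONDITION & SPEC =====
def Spec_count (mapp : List (List Int)) (out : Int) : Prop := out = count_alt mapp
instance (mapp : List (List Int)) (out : Int) : Decidable (Spec_count mapp out) := by unfold Spec_count; infer_instance

-- ===== CLAIM (what is proved, stated in full; the proofs are below) =====
def Claim_equal_count : Prop := ∀ (mapp : List (List Int)), Dom_count mapp → Spec_count mapp (count mapp)

-- ===== LEMMAS AND PROOFS =====

theorem rowRuns_ne_nil (lst : List Int) : rowRuns lst ≠ [] := by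
  unfold rowRuns
  simp [List.splitOn, List.splitOnP_ne_nil]

theorem rowRuns_headI_nonneg (lst : List Int) : 0 ≤ (rowRuns lst).headI := by
  unfold rowRuns
  cases h : (lst.map (fun j => if j == 1 then '1' else '0')).splitOn '0' with
  | nil => exact absurd h (List.splitOnP_ne_nil _ _)
  | cons a t => simp

theorem rowRuns_nil : rowRuns [] = [0] := by
  simp [rowRuns, List.splitOn, List.splitOnP_nil]

theorem rowRuns_cons_one (rest : List Int) :
    rowRuns (1 :: rest) = ((rowRuns rest).headI + 1) :: (rowRuns rest).tail := by
  unfold rowRuns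
  cases h : (rest.map (fun j => if j == 1 then '1' else '0')).splitOn '0' with
  | nil => exact absurd h (List.splitOnP_ne_nil _ _)
  | cons a t =>
    simp only [List.splitOn] at h ⊢
    rw [List.map_cons, show (if ((1 : Int) == 1) = true then '1' else '0') = '1' from rfl,
      List.splitOnP_cons, h]
    simp

theorem rowRuns_cons_ne (j : Int) (hj : j ≠ 1) (rest : List Int) :
    rowRuns (j :: rest) = 0 :: rowRuns rest := by
  unfold rowRuns
  simp [List.splitOn, List.splitOnP_cons, hj]

theorem row_lemma : ∀ (lst : List Int) (cnt mx : Int), 0 ≤ cnt → cnt ≤ mx →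
    (lst.foldl countStep (cnt, mx)).2 =
      List.foldl max mx ((cnt + (rowRuns lst).headI) :: (rowRuns lst).tail) := by
  intro lst
  induction lst with
  | nil =>
    intro cnt mx h0 h1
    simp [rowRuns_nil]
    omega
  | cons j rest ih =>
    intro cnt mx h0 h1
    by_cases hj : j = 1
    · subst hj
      have hstep : countStep (cnt, mx) 1 = (cnt + 1, max mx (cnt + 1)) := by
        simp [countStep]; omega
      rw [List.foldl_cons, hstep,
        ih (cnt + 1) (max mx (cnt + 1)) (by omega) (le_max_right _ _),
        rowRuns_cons_one]
      have hh := rowRuns_headI_nonneg rest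
      simp only [List.headI_cons, List.tail_cons, List.foldl_cons]
      congr 1
      omega
    · have hstep : countStep (cnt, mx) j = (0, mx) := by
        simp [countStep, hj]
      rw [List.foldl_cons, hstep, ih 0 mx le_rfl (by omega),
        rowRuns_cons_ne j hj rest]
      cases hr : rowRuns rest with
      | nil => exact absurd hr (rowRuns_ne_nil rest)
      | cons a t =>
        simp only [List.headI_cons, List.tail_cons, List.foldl_cons, zero_add]
        congr 1
        omega

theorem row_zero (lst : List Int) (mx : Int) (h : 0 ≤ mx) :
    (lst.foldl countStep (0, mx)).2 = (rowRuns lst).foldl max mx := by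
  rw [row_lemma lst 0 mx le_rfl h]
  cases hr : rowRuns lst with
  | nil => exact absurd hr (rowRuns_ne_nil lst)
  | cons a t => simp

theorem le_foldl_max_int (l : List Int) (mx : Int) : mx ≤ l.foldl max mx := by
  induction l generalizing mx with
  | nil => exact le_rfl
  | cons a t ih => exact le_trans (le_max_left mx a) (ih (max mx a))

theorem main_lemma : ∀ (mapp : List (List Int)) (mx : Int), 0 ≤ mx →
    mapp.foldl (fun mx lst => (lst.foldl countStep (0, mx)).2) mx =
      (mapp.flatMap rowRuns).foldl max mx := by
  intro mapp
  induction mapp with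
  | nil => intro mx _; rfl
  | cons h t ih =>
    intro mx hmx
    rw [List.foldl_cons, row_zero h mx hmx, List.flatMap_cons, List.foldl_append]
    exact ih _ (le_trans hmx (le_foldl_max_int _ _))

-- ===== VERDICT (by name: the statement is the Claim_ definition above) =====
theorem count_spec : Claim_equal_count := by
  intro mapp _
  unfold Spec_count count count_alt
  rw [PySem.List.max?_id_cons]
  simpa using main_lemma mapp 2 (by norm_num)
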